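-- pv_equiv track=rewrite | github.com/kikimonsterAF/JamShed.AI | server/app/aisu_deep_transformer.py | _remove_short_segments
-- ===== SOURCE A (Python) =====
-- from typing import List, Tuple, Optional
--
-- def _remove_short_segments(chords: List[str], min_length: int = 3) -> List[str]:
--     """Remove chord segments that are too short"""
--     if len(chords) < min_length:
--         return chords
--
--     cleaned = []
--     i = 0
--     while i < len(chords):
--         current_chord = chords[i]
--         segment_length = 1
--
--         # Count consecutive occurrences
--         while i + segment_length < len(chords) and chords[i + segment_length] == current_chord:
--             segment_length += 1
--
--         if segment_length >= min_length or len(cleaned) == 0: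
--             cleaned.extend([current_chord] * segment_length)
--         else:
--             # Replace short segment with previous chord
--             if cleaned:
--                 cleaned.extend([cleaned[-1]] * segment_length)
--             else:
--                 cleaned.extend([current_chord] * segment_length)
--
--         i += segment_length
--
--     return cleaned
-- ===== SOURCE B (Python) =====
-- def _remove_short_segments(chords, min_length=3):
--     """Remove chord segments that are too short (RLE pass + emission pass)."""
--     if len(chords) < min_length:
--         return chords
--
--     # Phase 1: run-length encode into (chord, count) pairs.
--     runs = []
--     for c in chords:
--         if runs and runs[-1][0] == c:
--             runs[-1][1] += 1
--         else:
--             runs.append([c, 1])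
--
--     # Phase 2: emit, chaining replacements off the last kept chord.
--     out = []
--     last_kept = None
--     for c, n in runs:
--         if n >= min_length or last_kept is None:
--             out.extend([c] * n)
--             last_kept = c
--         else:
--             out.extend([last_kept] * n)
--     return out
-- ===== Notes on version B (the rewrite author's own statement) =====
-- stated objective: alternative
-- what changed: B splits A's single index-walking while-loop into two separate passes: it first materializes a run-length encoding of the chord list, then emits output from the run table while tracking a single last_kept chord instead of peeking at cleaned[-1].
import Mathlib
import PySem

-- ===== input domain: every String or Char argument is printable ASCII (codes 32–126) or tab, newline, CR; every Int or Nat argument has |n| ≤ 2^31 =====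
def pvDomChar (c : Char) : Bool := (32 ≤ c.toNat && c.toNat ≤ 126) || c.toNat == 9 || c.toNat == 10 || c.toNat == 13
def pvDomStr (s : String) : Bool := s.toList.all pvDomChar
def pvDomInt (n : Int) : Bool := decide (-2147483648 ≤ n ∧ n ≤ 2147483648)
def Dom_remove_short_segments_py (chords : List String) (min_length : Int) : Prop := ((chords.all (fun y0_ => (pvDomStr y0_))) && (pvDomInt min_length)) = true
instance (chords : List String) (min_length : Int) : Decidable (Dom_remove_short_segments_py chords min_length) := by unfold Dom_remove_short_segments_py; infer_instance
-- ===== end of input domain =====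

-- B restates A as two passes: an explicit run-length encoding, then an emission pass
-- driven by a single last_kept variable; same O(n) cost, different decomposition.

-- ===== PORT A =====
-- inner while loop: count consecutive occurrences of `current` in the remainder
def pvAInner (current : String) (rest : List String) (seg : Nat) : Nat :=
  match rest with
  | [] => seg
  | c :: t => if c == current then pvAInner current t (seg + 1) else seg

theorem pvAInner_ge (current : String) (rest : List String) (seg : Nat) :
    seg ≤ pvAInner current rest seg := by
  induction rest generalizing seg with
  | nil => simp [pvAInner]
  | cons c t ih =>
    simp only [pvAInner]
    split
    · exact Nat.le_trans (Nat.le_succ seg) (ih (seg + 1))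
    · exact Nat.le_refl seg

-- outer while loop over i, advanced by segment_length = dropping seg elements
def pvALoop (min_length : Int) (cleaned : List String) : List String → List String
  | [] => cleaned
  | c :: rest =>
      let seg := pvAInner c rest 1
      let cleaned' :=
        if (seg : Int) ≥ min_length ∨ cleaned = [] then
          cleaned ++ List.replicate seg c
        else if cleaned ≠ [] then
          cleaned ++ List.replicate seg (cleaned.getLastD "")
        else
          cleaned ++ List.replicate seg c
      pvALoop min_length cleaned' ((c :: rest).drop seg)
termination_by l => l.length
decreasing_by
  have h1 : 1 ≤ pvAInner c rest 1 := pvAInner_ge c rest 1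
  simp [List.length_drop]; omega

def remove_short_segments_py (chords : List String) (min_length : Int) : List String :=
  if (chords.length : Int) < min_length then chords
  else pvALoop min_length [] chords

-- ===== PORT B =====
-- phase 1: run-length encode (runs kept head-first = Python's runs[-1] is the head)
def pvBRle (acc : List (String × Nat)) : List String → List (String × Nat)
  | [] => acc.reverse
  | c :: rest =>
      match acc with
      | (c', n) :: t => if c' == c then pvBRle ((c', n + 1) :: t) rest
                        else pvBRle ((c, 1) :: (c', n) :: t) rest
      | [] => pvBRle [(c, 1)] rest

-- phase 2: emit from the run table, tracking last_kept
def pvBEmit (min_length : Int) (last_kept : Option String) (out : List String) :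
    List (String × Nat) → List String
  | [] => out
  | (c, n) :: rest =>
      if (n : Int) ≥ min_length ∨ last_kept = none then
        pvBEmit min_length (some c) (out ++ List.replicate n c) rest
      else
        pvBEmit min_length last_kept (out ++ List.replicate n (last_kept.getD "")) rest

def remove_short_segments_py_alt (chords : List String) (min_length : Int) : List String :=
  if (chords.length : Int) < min_length then chords
  else pvBEmit min_length none [] (pvBRle [] chords)

-- ===== PRECONDITION & SPEC =====
def Spec_remove_short_segments_py (chords : List String) (min_length : Int) (out : List String) : Prop := out = remove_short_segments_py_alt chords min_length
instance (chords : List String) (min_length : Int) (out : List String) : Decidable (Spec_remove_short_segments_py chords min_length out) := by unfold Spec_remove_short_segments_py; infer_instance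

-- ===== CLAIM (what is proved, stated in full; the proofs are below) =====
def Claim_equal_remove_short_segments_py : Prop := ∀ (chords : List String) (min_length : Int), Dom_remove_short_segments_py chords min_length → Spec_remove_short_segments_py chords min_length (remove_short_segments_py chords min_length)

-- ===== LEMMAS AND PROOFS =====

theorem pvTakeWhileLen {α : Type} (p : α → Bool) (l : List α) :
    (l.takeWhile p).length ≤ l.length := by
  induction l with
  | nil => simp [List.takeWhile]
  | cons x t ih =>
    simp only [List.takeWhile]
    split
    · simp only [List.length_cons]; omega
    · simp only [List.length_nil, List.length_cons]; omega

-- proof-side canonical run-length encoding, mirroring A's segmentation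
def pvRle : List String → List (String × Nat)
  | [] => []
  | c :: rest =>
      (c, (rest.takeWhile (· == c)).length + 1) ::
        pvRle (rest.drop (rest.takeWhile (· == c)).length)
termination_by l => l.length
decreasing_by
  have := pvTakeWhileLen (· == c) rest
  simp only [List.length_drop, List.length_cons]; omega

theorem pvAInner_eq (c : String) (rest : List String) (s : Nat) :
    pvAInner c rest s = s + (rest.takeWhile (· == c)).length := by
  induction rest generalizing s with
  | nil => simp [pvAInner, List.takeWhile]
  | cons x t ih =>
    simp only [pvAInner, List.takeWhile]
    by_cases h : (x == c) = true
    · simp only [h, if_true, ih, List.length_cons]; omega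
    · simp only [h]
      simp only [Bool.not_eq_true] at h
      simp

theorem pvBRle_cons (xs : List String) :
    ∀ (c : String) (n : Nat) (t : List (String × Nat)),
    pvBRle ((c, n) :: t) xs =
      t.reverse ++ (c, n + (xs.takeWhile (· == c)).length) ::
        pvRle (xs.drop (xs.takeWhile (· == c)).length) := by
  induction xs with
  | nil => intro c n t; simp [pvBRle, pvRle]
  | cons x rest ih =>
    intro c n t
    simp only [pvBRle]
    by_cases h : c = x
    · rw [if_pos (by simp [h]), ih]
      have h1 : List.takeWhile (· == c) (x :: rest) = x :: List.takeWhile (· == c) rest := by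
        simp [List.takeWhile, h]
      rw [h1]
      simp only [List.length_cons, List.drop_succ_cons]
      have h2 : n + 1 + (List.takeWhile (· == c) rest).length =
          n + ((List.takeWhile (· == c) rest).length + 1) := by omega
      rw [h2]
    · rw [if_neg (by simp [h]), ih]
      have h1 : List.takeWhile (· == c) (x :: rest) = [] := by
        simp only [List.takeWhile]
        have : (x == c) = false := by
          simp only [beq_eq_false_iff_ne, ne_eq]
          exact fun e => h e.symm
        simp [this]
      rw [h1]
      simp only [List.length_nil, Nat.add_zero, List.drop_zero, List.reverse_cons,
        List.append_assoc, List.cons_append, List.nil_append]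
      rw [pvRle]
      simp [Nat.add_comm]

theorem pvBRle_eq (xs : List String) : pvBRle [] xs = pvRle xs := by
  cases xs with
  | nil => simp [pvBRle, pvRle]
  | cons c rest =>
    show pvBRle [(c, 1)] rest = _
    rw [pvBRle_cons, pvRle]
    simp [Nat.add_comm]

theorem pvGetLastRepl (l : List String) (a : String) (n : Nat) :
    (l ++ List.replicate (n + 1) a).getLast? = some a := by
  induction l with
  | nil =>
    induction n with
    | zero => simp
    | succ m ih => simpa [List.replicate_succ] using ih
  | cons x t ih =>
    cases t with
    | nil => cases n <;> simp_all [List.replicate_succ]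
    | cons b u => simpa using ih

theorem pvGetLastD (l : List String) (h : l ≠ []) :
    l.getLast? = some (l.getLastD "") := by
  induction l with
  | nil => cases h rfl
  | cons a t ih =>
    cases t with
    | nil => simp
    | cons b u => simpa using ih (by simp)

theorem pvMain (ml : Int) :
    ∀ (n : Nat) (xs : List String), xs.length ≤ n → ∀ (cleaned : List String),
    pvALoop ml cleaned xs = pvBEmit ml cleaned.getLast? cleaned (pvRle xs) := by
  intro n
  induction n with
  | zero =>
    intro xs hx cleaned
    have hxs : xs = [] := List.eq_nil_of_length_eq_zero (Nat.le_zero.mp hx)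
    subst hxs; simp [pvALoop, pvRle, pvBEmit]
  | succ m ih =>
    intro xs hx cleaned
    cases xs with
    | nil => simp [pvALoop, pvRle, pvBEmit]
    | cons c rest =>
      have hseg : pvAInner c rest 1 = (rest.takeWhile (· == c)).length + 1 := by
        rw [pvAInner_eq]; omega
      set k := (rest.takeWhile (· == c)).length with hk
      have hklen : k ≤ rest.length := pvTakeWhileLen _ _
      have hlen : (rest.drop k).length ≤ m := by
        simp only [List.length_cons] at hx
        simp only [List.length_drop]; omega
      have hnone : cleaned.getLast? = none ↔ cleaned = [] := by
        cases cleaned <;> simp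
      rw [pvALoop, pvRle]
      simp only [hseg, ← hk, pvBEmit, List.drop_succ_cons]
      by_cases hcond : ((k + 1 : Nat) : Int) ≥ ml ∨ cleaned.getLast? = none
      · have hcondA : ((k + 1 : Nat) : Int) ≥ ml ∨ cleaned = [] := by
          rcases hcond with h | h
          · exact Or.inl h
          · exact Or.inr (hnone.mp h)
        rw [if_pos hcondA, if_pos hcond, ih _ hlen, pvGetLastRepl]
      · have hcondA : ¬ (((k + 1 : Nat) : Int) ≥ ml ∨ cleaned = []) := by
          intro h
          apply hcond
          rcases h with h | h
          · exact Or.inl h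
          · exact Or.inr (hnone.mpr h)
        have hne : cleaned ≠ [] := fun h => hcondA (Or.inr h)
        rw [if_neg hcondA, if_pos hne, if_neg hcond, ih _ hlen, pvGetLastRepl,
          pvGetLastD cleaned hne]
        rfl

-- ===== VERDICT (by name: the statement is the Claim_ definition above) =====
theorem remove_short_segments_py_spec : Claim_equal_remove_short_segments_py := by
  intro chords min_length _
  show remove_short_segments_py chords min_length = remove_short_segments_py_alt chords min_length
  unfold remove_short_segments_py remove_short_segments_py_alt
  split
  · rfl
  · rw [pvBRle_eq, pvMain min_length chords.length chords (Nat.le_refl _) []]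
    rfl
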